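-- pv_equiv track=rewrite | github.com/kavya7704/Python-Simple-codes | Help of Prepsters.py | set_bit
-- ===== SOURCE A (Python) =====
-- def set_bit(n,k):
--     count = 0
--     num = 1
--     while num < n:
--         if bin(num).count("1") == k:
--             count += 1
--         num += 1
--     return count
-- ===== SOURCE B (Python) =====
-- def _comb(n, k):
--     # binomial coefficient, 0 when k is out of range
--     if k < 0 or k > n:
--         return 0
--     r = 1
--     for i in range(k):
--         r = r * (n - i) // (i + 1)
--     return r
--
-- def set_bit(n, k):
--     # digit DP over the bits of m = n-1: count x in [1, n) with popcount(x) == k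
--     if n <= 1 or k < 0:
--         return 0
--     m = n - 1
--     bits = []
--     t = m
--     while t:
--         bits.append(t & 1)
--         t >>= 1
--     total = 0
--     ones = 0
--     for i in range(len(bits) - 1, -1, -1):
--         if bits[i]:
--             total += _comb(i, k - ones)
--             ones += 1
--     if ones == k:
--         total += 1      # x = m itself
--     if k == 0:
--         total -= 1      # exclude x = 0
--     return total
-- ===== Notes on version B (the rewrite author's own statement) =====
-- stated objective: faster
-- what changed: A tests the popcount of every integer in [1, n) one by one; B runs a combinatorial digit DP over the bits of n-1, adding a binomial coefficient C(i, k-ones) at each set bit, so the scan over n numbers disappears.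
import Mathlib
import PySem

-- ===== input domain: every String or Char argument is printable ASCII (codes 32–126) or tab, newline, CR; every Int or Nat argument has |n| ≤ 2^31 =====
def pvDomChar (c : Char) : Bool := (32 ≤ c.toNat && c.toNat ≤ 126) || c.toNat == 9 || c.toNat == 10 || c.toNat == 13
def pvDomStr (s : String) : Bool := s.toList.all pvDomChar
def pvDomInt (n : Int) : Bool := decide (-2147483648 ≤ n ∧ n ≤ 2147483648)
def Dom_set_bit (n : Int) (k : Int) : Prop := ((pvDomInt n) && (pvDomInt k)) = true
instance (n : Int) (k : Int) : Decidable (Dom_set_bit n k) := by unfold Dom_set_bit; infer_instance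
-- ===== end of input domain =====

-- B replaces A's per-number popcount scan of [1, n) by a combinatorial digit DP over the
-- bits of n-1 (binomials count the numbers with popcount k below each prefix): objective faster.

-- ===== PORT A =====
-- 'while num < n: … ; num += 1' — fuel = number of remaining iterations, (n - 1).toNat at entry.
-- bin(num).count("1") is PySem.Int.bitCount num (exact for every int).
def pvALoop (n k count num : Int) : Nat → Int
  | 0 => count
  | fuel+1 =>
    if num < n then
      pvALoop n k (if (PySem.Int.bitCount num : Int) = k then count + 1 else count) (num + 1) fuel
    else count

def set_bit (n : Int) (k : Int) : Int := pvALoop n k 0 1 (n - 1).toNat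

-- ===== PORT B =====
-- _comb(n, k): the multiplicative loop r = r * (n - i) // (i + 1)
def pvComb (nn kk : Int) : Int :=
  if kk < 0 ∨ nn < kk then 0
  else (List.range kk.toNat).foldl
        (fun (r : Int) (i : Nat) => PySem.Int.floordiv (r * (nn - (i : Int))) ((i : Int) + 1)) 1

-- 'while t: bits.append(t & 1); t >>= 1' — t starts at n-1 ≥ 1 and stays ≥ 0, so Nat recursion is exact
def pvBits : Nat → List Int
  | 0 => []
  | t+1 => (((t+1) % 2 : Nat) : Int) :: pvBits ((t+1)/2)

-- body of 'for i in range(len(bits)-1, -1, -1)', state = (total, ones)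
def pvBStep (k : Int) (bits : List Int) (st : Int × Int) (i : Nat) : Int × Int :=
  if bits.getD i 0 ≠ 0 then (st.1 + pvComb (i : Int) (k - st.2), st.2 + 1) else st

def set_bit_alt (n : Int) (k : Int) : Int :=
  if n ≤ 1 ∨ k < 0 then 0
  else
    let m := n - 1
    let bits := pvBits m.toNat
    let st := ((List.range bits.length).reverse).foldl (pvBStep k bits) (0, 0)
    let total := if st.2 = k then st.1 + 1 else st.1
    if k = 0 then total - 1 else total

-- ===== PRECONDITION & SPEC =====
def Spec_set_bit (n : Int) (k : Int) (out : Int) : Prop := out = set_bit_alt n k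
instance (n : Int) (k : Int) (out : Int) : Decidable (Spec_set_bit n k out) := by unfold Spec_set_bit; infer_instance

-- ===== CLAIM (what is proved, stated in full; the proofs are below) =====
def Claim_equal_set_bit : Prop := ∀ (n : Int) (k : Int), Dom_set_bit n k → Spec_set_bit n k (set_bit n k)

-- ===== LEMMAS AND PROOFS =====

-- popcount on Nat, written through the PySem primitive the ports use
def pvPc (m : Nat) : Nat := PySem.Int.bitCount (m : Int)

-- number of x ∈ [0, m) with popcount j
def pvCnt (m j : Nat) : Nat := (List.range m).countP (fun x => pvPc x = j)

-- Int-valued count with a possibly negative target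
def pvCntI (m : Nat) (j : Int) : Int := if 0 ≤ j then (pvCnt m j.toNat : Int) else 0

lemma pvPc_zero : pvPc 0 = 0 := by decide

lemma pvPc_succ (m : Nat) (h : 0 < m) : pvPc m = m % 2 + pvPc (m / 2) := by
  unfold pvPc; exact PySem.Int.bitCount_natCast h

lemma pvPc_pow_add (e : Nat) : ∀ x : Nat, x < 2 ^ e → pvPc (2 ^ e + x) = pvPc x + 1 := by
  induction e with
  | zero => intro x hx; interval_cases x; decide
  | succ e ih =>
    intro x hx
    have hp : 0 < 2 ^ e := by positivity
    have h1 : 0 < 2 ^ (e+1) + x := by positivity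
    rw [pvPc_succ _ h1]
    have hd : (2 ^ (e+1) + x) / 2 = 2 ^ e + x / 2 := by
      have : 2 ^ (e+1) = 2 * 2 ^ e := by ring
      omega
    have hm : (2 ^ (e+1) + x) % 2 = x % 2 := by
      have : 2 ^ (e+1) = 2 * 2 ^ e := by ring
      omega
    rw [hd, hm, ih (x / 2) (by
      have : 2 ^ (e+1) = 2 * 2 ^ e := by ring
      omega)]
    rcases Nat.eq_zero_or_pos x with h0 | h0
    · subst h0; simp [pvPc_zero]
    · rw [pvPc_succ x h0]; omega

lemma pvCnt_zero (j : Nat) : pvCnt 0 j = 0 := by simp [pvCnt]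

-- countP over the shifted upper half
lemma pvCnt_shift (e r j : Nat) (hr : r ≤ 2 ^ e) :
    ((List.range r).map (2 ^ e + ·)).countP (fun x => pvPc x = j)
      = (List.range r).countP (fun x => pvPc x + 1 = j) := by
  rw [List.countP_map]
  apply List.countP_congr
  intro a ha
  simp only [List.mem_range] at ha
  simp [Function.comp, pvPc_pow_add e a (lt_of_lt_of_le ha hr)]

lemma pvCnt_split (e r j : Nat) (hr : r ≤ 2 ^ e) :
    pvCnt (2 ^ e + r) j = pvCnt (2 ^ e) j + (List.range r).countP (fun x => pvPc x + 1 = j) := by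
  unfold pvCnt
  rw [List.range_add, List.countP_append, pvCnt_shift e r j hr]

lemma pvCnt_pow (e j : Nat) : pvCnt (2 ^ e) j = Nat.choose e j := by
  induction e generalizing j with
  | zero =>
    unfold pvCnt
    rcases j with _ | j
    · decide
    · simp only [pow_zero]
      rcases j with _|j <;> simp [List.countP, List.countP.go, pvPc_zero]
  | succ e ih =>
    have h2 : 2 ^ (e+1) = 2 ^ e + 2 ^ e := by ring
    rw [h2, pvCnt_split e (2^e) j le_rfl]
    rcases j with _ | j
    · simp [ih]
    · have : (List.range (2^e)).countP (fun x => pvPc x + 1 = j+1)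
          = (List.range (2^e)).countP (fun x => pvPc x = j) := by
        apply List.countP_congr; intro a _; simp
      rw [this]
      have hc : (List.range (2^e)).countP (fun x => pvPc x = j) = pvCnt (2^e) j := rfl
      rw [hc, ih (j+1), ih j, Nat.choose_succ_succ]
      simp only [Nat.succ_eq_add_one]
      omega

lemma pvCnt_pow_add (e r j : Nat) (hr : r < 2 ^ e) :
    pvCnt (2 ^ e + r) j = Nat.choose e j + (match j with | 0 => 0 | jj+1 => pvCnt r jj) := by
  rw [pvCnt_split e r j (le_of_lt hr), pvCnt_pow]
  congr 1
  rcases j with _ | j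
  · simp
  · apply List.countP_congr; intro a _; simp

lemma pvComb_fold (N : Nat) : ∀ K : Nat, K ≤ N →
    (List.range K).foldl
      (fun (r : Int) (i : Nat) => PySem.Int.floordiv (r * ((N : Int) - (i : Int))) ((i : Int) + 1)) 1
      = ((N.choose K : Nat) : Int) := by
  intro K
  induction K with
  | zero => intro _; simp
  | succ K ih =>
    intro hK
    rw [List.range_succ, List.foldl_append, ih (by omega)]
    simp only [List.foldl_cons, List.foldl_nil]
    have hNK : (N : Int) - (K : Int) = ((N - K : Nat) : Int) := by
      push_cast [Nat.cast_sub (by omega : K ≤ N)]; ring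
    rw [hNK]
    have : ((N.choose K : Nat) : Int) * ((N - K : Nat) : Int) = (((N.choose K * (N - K)) : Nat) : Int) := by push_cast; ring
    rw [this]
    have h1 : ((K : Int) + 1) = (((K + 1 : Nat)) : Int) := by push_cast; ring
    rw [h1, PySem.Int.floordiv_natCast]
    congr 1
    rw [← Nat.choose_succ_right_eq]
    exact Nat.mul_div_cancel _ (by omega)

lemma pvComb_eq (N : Nat) (j : Int) :
    pvComb (N : Int) j = if 0 ≤ j then ((N.choose j.toNat : Nat) : Int) else 0 := by
  unfold pvComb
  rcases lt_or_ge j 0 with h | h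
  · rw [if_pos (Or.inl h), if_neg (by omega)]
  · rw [if_pos h]
    rcases le_or_gt j (N : Int) with hle | hgt
    · rw [if_neg (by omega)]
      exact pvComb_fold N j.toNat (by omega)
    · rw [if_pos (Or.inr hgt), Nat.choose_eq_zero_of_lt (by omega), Nat.cast_zero]

lemma pvCntI_pow_add (L r : Nat) (j : Int) (hr : r < 2 ^ L) :
    pvCntI (2 ^ L + r) j = (if 0 ≤ j then ((L.choose j.toNat : Nat) : Int) else 0) + pvCntI r (j - 1) := by
  unfold pvCntI
  rcases lt_trichotomy j 0 with h | h | h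
  · rw [if_neg (by omega), if_neg (by omega), if_neg (by omega)]; ring
  · subst h
    rw [if_pos le_rfl, if_pos le_rfl, if_neg (by omega)]
    simp only [Int.toNat_zero]
    rw [pvCnt_pow_add L r 0 hr]
    push_cast
    simp
  · rw [if_pos (by omega), if_pos (by omega), if_pos (by omega)]
    have hj : j.toNat = (j - 1).toNat + 1 := by omega
    rw [hj, pvCnt_pow_add L r _ hr]
    push_cast
    ring

lemma pvBits_getD (m : Nat) : ∀ i : Nat, (pvBits m).getD i 0 = ((m / 2 ^ i % 2 : Nat) : Int) := by
  induction m using pvBits.induct with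
  | case1 => intro i; simp [pvBits]
  | case2 t ih =>
    intro i
    rcases i with _ | i
    · simp [pvBits]
    · simp only [pvBits, List.getD_cons_succ]
      rw [ih i]
      congr 2
      rw [Nat.div_div_eq_div_mul, pow_succ, Nat.mul_comm]

lemma pvBits_lt (m : Nat) : m < 2 ^ (pvBits m).length := by
  induction m using pvBits.induct with
  | case1 => simp [pvBits]
  | case2 t ih =>
    have : (pvBits (t+1)).length = (pvBits ((t+1)/2)).length + 1 := by simp [pvBits]
    rw [this, pow_succ]
    omega

-- the descending fold computes the digit DP for the low L bits
lemma pvFold (m : Nat) (k : Int) : ∀ (L : Nat) (t o : Int),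
    ((List.range L).reverse).foldl (pvBStep k (pvBits m)) (t, o)
      = (t + pvCntI (m % 2 ^ L) (k - o), o + (pvPc (m % 2 ^ L) : Int)) := by
  intro L
  induction L with
  | zero =>
    intro t o
    simp [pvCntI, Nat.mod_one, pvCnt_zero, pvPc_zero]
  | succ L ih =>
    intro t o
    rw [List.range_succ, List.reverse_append]
    simp only [List.reverse_singleton, List.singleton_append, List.foldl_cons]
    have hsplit : m % 2 ^ (L+1) = m % 2 ^ L + 2 ^ L * (m / 2 ^ L % 2) := by
      have h : m % (2 ^ L * 2) = m % 2 ^ L + 2 ^ L * (m / 2 ^ L % 2) := Nat.mod_mul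
      rw [← pow_succ] at h
      omega
    have hrlt : m % 2 ^ L < 2 ^ L := Nat.mod_lt _ (by positivity)
    have hstep : pvBStep k (pvBits m) (t, o) L
        = if m / 2 ^ L % 2 ≠ 0 then (t + pvComb (L : Int) (k - o), o + 1) else (t, o) := by
      unfold pvBStep
      rw [pvBits_getD m L]
      by_cases hd : m / 2 ^ L % 2 = 0
      · simp [hd]
      · rw [if_pos (show ((m / 2 ^ L % 2 : Nat) : Int) ≠ 0 by exact_mod_cast hd), if_pos hd]
    rcases Nat.eq_zero_or_pos (m / 2 ^ L % 2) with hd | hd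
    · rw [hstep, if_neg (by omega), ih t o]
      rw [hsplit, hd]
      simp
    · have hd1 : m / 2 ^ L % 2 = 1 := by omega
      rw [hstep, if_pos (by omega), ih]
      rw [hsplit, hd1, Nat.mul_one, Nat.add_comm (m % 2 ^ L) (2 ^ L)]
      rw [pvCntI_pow_add L (m % 2 ^ L) (k - o) hrlt]
      rw [pvPc_pow_add L (m % 2 ^ L) hrlt]
      rw [pvComb_eq L (k - o)]
      have hko : k - (o + 1) = k - o - 1 := by ring
      rw [Prod.mk.injEq]
      constructor
      · rw [hko]; ring
      · push_cast; ring

-- A's loop counts the x ∈ [num, num+fuel) with popcount k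
lemma pvALoop_eq (n k : Int) : ∀ (fuel : Nat), ∀ (num c : Int), num + fuel ≤ n →
    pvALoop n k c num fuel
      = c + ((List.range fuel).countP (fun (j : Nat) => (PySem.Int.bitCount (num + (j : Int)) : Int) = k) : Int) := by
  intro fuel
  induction fuel with
  | zero => intro num c _; simp [pvALoop]
  | succ fuel ih =>
    intro num c h
    have hlt : num < n := by push_cast at h ⊢; omega
    rw [pvALoop, if_pos hlt, ih (num + 1) _ (by push_cast at h ⊢; omega)]
    rw [List.range_succ_eq_map, List.countP_cons, List.countP_map]
    have hc : (List.range fuel).countP ((fun (j : Nat) => decide ((PySem.Int.bitCount (num + (j:Int)) : Int) = k)) ∘ Nat.succ)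
        = (List.range fuel).countP (fun (j : Nat) => decide ((PySem.Int.bitCount ((num + 1) + (j:Int)) : Int) = k)) := by
      apply List.countP_congr
      intro a _
      simp only [Function.comp]
      have ha : num + ((Nat.succ a : Nat) : Int) = (num + 1) + (a : Int) := by push_cast; ring
      rw [ha]
    rw [hc]
    simp only [Nat.cast_zero, add_zero]
    by_cases hb : (PySem.Int.bitCount num : Int) = k <;> simp [hb] <;> push_cast <;> omega

-- ===== VERDICT (by name: the statement is the Claim_ definition above) =====
theorem set_bit_spec : Claim_equal_set_bit := by
  intro n k _
  unfold Spec_set_bit set_bit set_bit_alt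
  by_cases hn : n ≤ 1
  · rw [if_pos (Or.inl hn)]
    have : (n - 1).toNat = 0 := by omega
    rw [this]
    rfl
  · rw [not_le] at hn
    set M : Nat := (n - 1).toNat with hM
    have hM1 : 1 ≤ M := by omega
    have hfit : (1 : Int) + (M : Int) ≤ n := by omega
    rw [pvALoop_eq n k M 1 0 hfit, zero_add]
    by_cases hk : k < 0
    · rw [if_pos (Or.inr hk)]
      have : (List.range M).countP (fun (j : Nat) => (PySem.Int.bitCount ((1:Int) + (j : Int)) : Int) = k) = 0 := by
        rw [List.countP_eq_zero]
        intro a _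
        simp only [decide_eq_true_eq]
        intro hEq
        have : (0:Int) ≤ (PySem.Int.bitCount ((1:Int) + (a : Int)) : Int) := by positivity
        omega
      rw [this]; rfl
    · rw [not_lt] at hk
      rw [if_neg (by omega)]
      dsimp only
      set K : Nat := k.toNat with hK
      have hkK : k = (K : Int) := by omega
      -- A's count, restated over pvPc
      have hpred : (List.range M).countP (fun (j : Nat) => (PySem.Int.bitCount ((1:Int) + (j : Int)) : Int) = k)
          = (List.range M).countP (fun (j : Nat) => pvPc (j + 1) = K) := by
        apply List.countP_congr
        intro a _
        have h1 : (1:Int) + (a : Int) = (((a + 1 : Nat)) : Int) := by push_cast; ring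
        simp only [decide_eq_true_eq, h1, hkK]
        unfold pvPc
        constructor
        · intro h; exact_mod_cast h
        · intro h; exact_mod_cast h
      rw [hpred]
      -- B's fold value
      rw [pvFold M k (pvBits M).length 0 0]
      have hmod : M % 2 ^ (pvBits M).length = M := Nat.mod_eq_of_lt (pvBits_lt M)
      rw [hmod]
      simp only [sub_zero, zero_add]
      have hcnt : pvCntI M k = (pvCnt M K : Int) := by
        unfold pvCntI; rw [if_pos hk]
      rw [hcnt]
      -- counting identities around pvCnt (M+1) K
      have hsucc : pvCnt (M + 1) K = pvCnt M K + (if pvPc M = K then 1 else 0) := by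
        unfold pvCnt
        rw [List.range_succ, List.countP_append]
        simp [List.countP_cons]
      have hshift : pvCnt (M + 1) K
          = (List.range M).countP (fun (j : Nat) => pvPc (j + 1) = K) + (if K = 0 then 1 else 0) := by
        unfold pvCnt
        rw [List.range_succ_eq_map, List.countP_cons, List.countP_map]
        have : (List.range M).countP ((fun x => decide (pvPc x = K)) ∘ Nat.succ)
            = (List.range M).countP (fun (j : Nat) => pvPc (j + 1) = K) := by
          apply List.countP_congr; intro a _; simp [Function.comp, Nat.succ_eq_add_one]
        rw [this]
        simp [pvPc_zero, eq_comm]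
      have hA : ((List.range M).countP (fun (j : Nat) => pvPc (j + 1) = K) : Int)
          = (pvCnt M K : Int) + (if pvPc M = K then (1:Int) else 0) - (if K = 0 then (1:Int) else 0) := by
        split_ifs at hsucc hshift ⊢ <;> omega
      rw [hA, hkK]
      simp only [Nat.cast_inj, Nat.cast_eq_zero]
      split_ifs <;> omega
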